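-- pv_equiv track=rewrite | github.com/BoudewijnKlijn/competitive_programming | adventofcode/2023/day12.py | get_current_groups
-- ===== SOURCE A (Python) =====
-- def get_current_groups(records, current_length=0):
--     """Check records until a question mark is found.
--     Return the groups which are certain (current groups), the consecutive number of brackets
--     directly before the question mark, and the remaining records."""
--     current_groups = []
--     for i, char in enumerate(records):
--         if char == "?":
--             return tuple(current_groups), current_length, records[i:]
--         if char == "#":
--             current_length += 1
--         elif current_length:
--             current_groups.append(current_length)
--             current_length = 0
--     if current_length:
--         current_groups.append(current_length)
--     return tuple(current_groups), 0, ""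
-- ===== SOURCE B (Python) =====
-- def get_current_groups(records, current_length=0):
--     """Split-based reimplementation: cut at the first '?', split the head into
--     '#'-runs separated by any other character, merge current_length into the
--     first run arithmetically, and read the groups off the run lengths."""
--     idx = records.find('?')
--     head = records if idx == -1 else records[:idx]
--     parts = ''.join(c if c == '#' else '.' for c in head).split('.')
--     vals = [len(p) for p in parts]
--     vals[0] += current_length
--     if idx == -1:
--         return tuple(v for v in vals if v), 0, ''
--     return tuple(v for v in vals[:-1] if v), vals[-1], records[idx:]
-- ===== Notes on version B (the rewrite author's own statement) =====
-- stated objective: idiomatic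
-- what changed: Replaces A's character-by-character state machine (running length + flush-on-separator, early return in the loop) by a find/split pipeline: cut the string at the first '?', normalise separators and split the head into '#'-runs, merge current_length into the first run arithmetically, and read groups and trailing run off the run lengths.
import Mathlib
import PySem

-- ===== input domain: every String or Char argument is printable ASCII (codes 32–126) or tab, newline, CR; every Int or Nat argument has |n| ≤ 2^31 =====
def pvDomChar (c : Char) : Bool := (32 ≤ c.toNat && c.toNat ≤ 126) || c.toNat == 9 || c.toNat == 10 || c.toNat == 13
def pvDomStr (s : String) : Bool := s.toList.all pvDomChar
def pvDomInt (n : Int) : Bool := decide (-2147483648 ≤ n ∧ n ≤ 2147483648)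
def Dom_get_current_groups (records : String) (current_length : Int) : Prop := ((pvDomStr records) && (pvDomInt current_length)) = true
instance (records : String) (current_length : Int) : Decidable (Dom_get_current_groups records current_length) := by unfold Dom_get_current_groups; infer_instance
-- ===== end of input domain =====

-- B replaces A's one-character state machine by a find/split pipeline (cut at the first '?',
-- split the head into '#'-runs, merge current_length into the first run); objective: idiomatic.

-- ===== PORT A =====
-- A's for-loop with early return; the remaining suffix of the scan is exactly records[i:].
def getCurrentGroupsLoop : List Char → Int → List Int → List Int × Int × String
  | [], cl, gs => ((if cl ≠ 0 then gs ++ [cl] else gs), 0, "")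
  | c :: rest, cl, gs =>
    if c = '?' then (gs, cl, String.mk (c :: rest))
    else if c = '#' then getCurrentGroupsLoop rest (cl + 1) gs
    else if cl ≠ 0 then getCurrentGroupsLoop rest 0 (gs ++ [cl])
    else getCurrentGroupsLoop rest 0 gs

def get_current_groups (records : String) (current_length : Int) : List Int × Int × String :=
  getCurrentGroupsLoop records.toList current_length []

-- ===== PORT B =====
-- str.split('.') ported by hand (exact: Python split on a single separator, keeping empty parts)
def splitDots : List Char → List (List Char)
  | [] => [[]]
  | c :: rest =>
    let r := splitDots rest
    if c = '.' then [] :: r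
    else
      match r with
      | [] => [[c]]      -- unreachable: splitDots is never []
      | g :: gs => (c :: g) :: gs

-- vals = [len(p) for p in parts]; vals[0] += current_length
def valsOf (cs : List Char) (cl : Int) : List Int :=
  match splitDots (cs.map (fun c => if c = '#' then '#' else '.')) with
  | [] => []            -- unreachable
  | p :: ps => ((p.length : Int) + cl) :: ps.map (fun q => (q.length : Int))

-- records.find('?') ported as findIdx? (idx == -1 ↔ none)
def get_current_groups_alt (records : String) (current_length : Int) : List Int × Int × String :=
  let cs := records.toList
  match cs.findIdx? (· = '?') with
  | none =>
    let vals := valsOf cs current_length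
    (vals.filter (fun v => v ≠ 0), 0, "")
  | some i =>
    let vals := valsOf (cs.take i) current_length
    (vals.dropLast.filter (fun v => v ≠ 0), vals.getLastD 0, String.mk (cs.drop i))

-- ===== PRECONDITION & SPEC =====
def Spec_get_current_groups (records : String) (current_length : Int) (out : List Int × Int × String) : Prop := out = get_current_groups_alt records current_length
instance (records : String) (current_length : Int) (out : List Int × Int × String) : Decidable (Spec_get_current_groups records current_length out) := by unfold Spec_get_current_groups; infer_instance

-- ===== CLAIM (what is proved, stated in full; the proofs are below) =====
def Claim_equal_get_current_groups : Prop := ∀ (records : String) (current_length : Int), Dom_get_current_groups records current_length → Spec_get_current_groups records current_length (get_current_groups records current_length)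

-- ===== LEMMAS AND PROOFS =====
theorem splitDots_ne_nil (cs : List Char) : splitDots cs ≠ [] := by
  cases cs with
  | nil => simp [splitDots]
  | cons c rest =>
    simp only [splitDots]
    split
    · simp
    · match h : splitDots rest with
      | [] => simp
      | g :: gs => simp

theorem valsOf_ne_nil (cs : List Char) (cl : Int) : valsOf cs cl ≠ [] := by
  unfold valsOf
  split
  · exact absurd ‹_› (splitDots_ne_nil _)
  · simp

theorem valsOf_nil (cl : Int) : valsOf [] cl = [cl] := by
  simp [valsOf, splitDots]

theorem valsOf_hash (cs : List Char) (cl : Int) :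
    valsOf ('#' :: cs) cl = valsOf cs (cl + 1) := by
  unfold valsOf
  simp only [List.map_cons, splitDots]
  match h : splitDots (cs.map (fun c => if c = '#' then '#' else '.')) with
  | [] => exact absurd h (splitDots_ne_nil _)
  | g :: gs => simp; ring

theorem valsOf_zero (cs : List Char) :
    valsOf cs 0 =
      (splitDots (cs.map (fun c => if c = '#' then '#' else '.'))).map
        (fun q => (q.length : Int)) := by
  unfold valsOf
  match h : splitDots (cs.map (fun c => if c = '#' then '#' else '.')) with
  | [] => exact absurd h (splitDots_ne_nil _)
  | g :: gs => simp

theorem valsOf_sep (c : Char) (cs : List Char) (cl : Int) (hh : c ≠ '#') :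
    valsOf (c :: cs) cl = cl :: valsOf cs 0 := by
  rw [valsOf_zero]
  unfold valsOf
  simp [List.map_cons, if_neg hh, splitDots]

theorem filter_cons_flush (cl : Int) (tv : List Int) :
    List.filter (fun v => decide (v ≠ 0)) (cl :: tv) =
      (if cl ≠ 0 then [cl] else []) ++ List.filter (fun v => decide (v ≠ 0)) tv := by
  by_cases hc0 : cl = 0 <;> simp [hc0]

-- A's loop against B's pipeline, with the accumulated groups as a prefix
theorem loop_eq_alt (cs : List Char) : ∀ (cl : Int) (gs : List Int),
    getCurrentGroupsLoop cs cl gs =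
      match cs.findIdx? (· = '?') with
      | none => (gs ++ (valsOf cs cl).filter (fun v => v ≠ 0), 0, "")
      | some i => (gs ++ ((valsOf (cs.take i) cl).dropLast.filter (fun v => v ≠ 0)),
          (valsOf (cs.take i) cl).getLastD 0, String.mk (cs.drop i)) := by
  induction cs with
  | nil =>
    intro cl gs
    simp only [getCurrentGroupsLoop, List.findIdx?_nil]
    rw [valsOf_nil]
    by_cases h : cl = 0 <;> simp [h, List.filter]
  | cons c rest ih =>
    intro cl gs
    rw [List.findIdx?_cons]
    by_cases hq : c = '?'
    · subst hq
      simp [getCurrentGroupsLoop, valsOf_nil]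
    · by_cases hhash : c = '#'
      · subst hhash
        rw [getCurrentGroupsLoop]
        rw [if_neg (by decide), if_pos rfl, ih]
        cases h : rest.findIdx? (· = '?') with
        | none => simp [valsOf_hash]
        | some i => simp [valsOf_hash]
      · -- separator character: flush cl (if nonzero) and continue with cl = 0
        have hlhs : getCurrentGroupsLoop (c :: rest) cl gs
            = getCurrentGroupsLoop rest 0 (gs ++ if cl ≠ 0 then [cl] else []) := by
          rw [getCurrentGroupsLoop]
          by_cases hc0 : cl = 0 <;> simp [hq, hhash, hc0]
        rw [hlhs, ih]
        cases h : rest.findIdx? (· = '?') with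
        | none =>
          simp only [Option.map_none]
          rw [valsOf_sep c rest cl hhash, filter_cons_flush]
          simp [hq]
        | some i =>
          simp only [Option.map_some]
          rw [if_neg (show ¬(decide (c = '?') = true) by simp [hq])]
          simp only [List.take_succ_cons, List.drop_succ_cons]
          rw [valsOf_sep c (rest.take i) cl hhash]
          match hv : valsOf (rest.take i) 0 with
          | [] => exact absurd hv (valsOf_ne_nil _ _)
          | v :: vs =>
            rw [List.dropLast_cons₂, filter_cons_flush,
              show (cl :: v :: vs).getLastD 0 = vs.getLastD v from by
                rw [List.getLastD_cons, List.getLastD_cons],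
              show (v :: vs).getLastD 0 = vs.getLastD v from by rw [List.getLastD_cons]]
            simp

-- ===== VERDICT (by name: the statement is the Claim_ definition above) =====
theorem get_current_groups_spec : Claim_equal_get_current_groups := by
  intro records current_length _
  unfold Spec_get_current_groups get_current_groups get_current_groups_alt
  rw [loop_eq_alt]
  cases h : records.toList.findIdx? (· = '?') with
  | none => simp only [h, List.nil_append]
  | some i => simp only [h, List.nil_append]
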